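-- pv_equiv track=rewrite | github.com/Velho-do-Mal/Sistema_ERP | pages/3_📋_Gestão_de_Projetos.py | compute_is_summary
-- ===== SOURCE A (Python) =====
-- def compute_is_summary(tasks: list[dict]) -> dict[str, bool]:
--     """Define se uma tarefa é resumo (possui filhos) baseado no código (1.2.3)."""
--     codes = [str(t.get("codigo", "")).strip() for t in tasks if str(t.get("codigo", "")).strip()]
--     is_summary: dict[str, bool] = {c: False for c in codes}
--     code_set = set(codes)
--     for c in codes:
--         prefix = c + "."
--         # se existir qualquer outro código com este prefixo => é resumo
--         if any((other != c and other.startswith(prefix)) for other in code_set):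
--             is_summary[c] = True
--     return is_summary
-- ===== SOURCE B (Python) =====
-- def compute_is_summary(tasks: list[dict]) -> dict[str, bool]:
--     """Define se uma tarefa é resumo (possui filhos) baseado no código (1.2.3)."""
--     codes = [str(t.get("codigo", "")).strip() for t in tasks if str(t.get("codigo", "")).strip()]
--     is_summary: dict[str, bool] = {c: False for c in codes}
--     # one pass: every proper dotted prefix of a present code is a summary
--     for c in codes:
--         parts = c.split(".")
--         acc = parts[0]
--         for p in parts[1:]:
--             if acc in is_summary:
--                 is_summary[acc] = True
--             acc += "." + p
--     return is_summary
-- ===== Notes on version B (the rewrite author's own statement) =====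
-- stated objective: alternative
-- what changed: Instead of scanning the whole code set for every code to find a dotted extension, B makes one pass that splits each code on '.' and marks its proper dotted prefixes that are keys of the dict; same result, different traversal (per-code prefix walk instead of pairwise scan).
import Mathlib
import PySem

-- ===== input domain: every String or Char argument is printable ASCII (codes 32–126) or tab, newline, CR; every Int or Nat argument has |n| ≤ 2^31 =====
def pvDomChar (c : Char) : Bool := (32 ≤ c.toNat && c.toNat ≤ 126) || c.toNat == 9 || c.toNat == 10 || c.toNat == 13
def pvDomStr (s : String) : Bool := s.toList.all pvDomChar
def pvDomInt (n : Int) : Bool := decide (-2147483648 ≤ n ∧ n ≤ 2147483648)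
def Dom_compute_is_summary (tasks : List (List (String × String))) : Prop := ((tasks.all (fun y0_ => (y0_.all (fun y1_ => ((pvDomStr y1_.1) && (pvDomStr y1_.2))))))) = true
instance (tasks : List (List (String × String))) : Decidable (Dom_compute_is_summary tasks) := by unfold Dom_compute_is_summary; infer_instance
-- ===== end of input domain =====

-- B replaces A's "for each code, scan the whole code set for a dotted extension" by one pass
-- that walks each code's own dotted prefixes and marks those present in the dict (same result).


-- ===== PORT A =====
def compute_is_summary (tasks : List (List (String × String))) : List (String × Bool) :=
  let codes : List String :=
    (tasks.map (fun t => PySem.Str.strip (PySem.Dict.getD (PySem.Dict.mk t) "codigo" ""))).filter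
      (fun s => s != "")
  let isSummary : PySem.Dict String Bool :=
    codes.foldl (fun d c => d.insert c false) PySem.Dict.empty
  let codeSet : PySem.Set String := PySem.Set.ofList codes
  -- set iteration consumed only by `any` (order-independent)
  let final : PySem.Dict String Bool :=
    codes.foldl (fun d c =>
      if codeSet.any (fun other => (other != c) && PySem.Str.startswith other (c ++ "."))
      then d.insert c true else d) isSummary
  final.items

-- ===== PORT B =====
def compute_is_summary_alt (tasks : List (List (String × String))) : List (String × Bool) :=
  let codes : List String :=
    (tasks.map (fun t => PySem.Str.strip (PySem.Dict.getD (PySem.Dict.mk t) "codigo" ""))).filter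
      (fun s => s != "")
  let isSummary : PySem.Dict String Bool :=
    codes.foldl (fun d c => d.insert c false) PySem.Dict.empty
  let final : PySem.Dict String Bool :=
    codes.foldl (fun d c =>
      let parts : List String := (PySem.Str.split? c ".").getD []      -- sep ≠ "" ⇒ never none
      let acc0 : String := (PySem.List.pyGet? parts 0).getD ""          -- split is never empty ⇒ parts[0] total
      ((parts.drop 1).foldl
        (fun (st : PySem.Dict String Bool × String) p =>
          ((if st.1.contains st.2 then st.1.insert st.2 true else st.1), st.2 ++ "." ++ p))
        (d, acc0)).1) isSummary
  final.items

-- ===== PRECONDITION & SPEC =====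
def Spec_compute_is_summary (tasks : List (List (String × String))) (out : List (String × Bool)) : Prop := out = compute_is_summary_alt tasks
instance (tasks : List (List (String × String))) (out : List (String × Bool)) : Decidable (Spec_compute_is_summary tasks out) := by unfold Spec_compute_is_summary; infer_instance

-- ===== CLAIM (what is proved, stated in full; the proofs are below) =====
def Claim_equal_compute_is_summary : Prop := ∀ (tasks : List (List (String × String))), Dom_compute_is_summary tasks → Spec_compute_is_summary tasks (compute_is_summary tasks)

-- ===== LEMMAS AND PROOFS =====

/-- PySem's fueled splitOn.go for a one-char separator, against Lean's `List.splitOnP`. -/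
theorem pv_go_eq (sep : Char) :
    ∀ (fuel : Nat) (l cur : List Char) (acc : List (List Char)), l.length ≤ fuel →
      PySem.Chars.splitOn.go [sep] fuel l cur acc
        = acc.reverse ++ List.modifyHead (fun t => cur.reverse ++ t) (List.splitOnP (· == sep) l) := by
  intro fuel
  induction fuel with
  | zero =>
    intro l cur acc h
    have : l = [] := List.eq_nil_of_length_eq_zero (Nat.le_zero.mp h)
    subst this
    simp [PySem.Chars.splitOn.go, List.splitOnP_nil]
  | succ n ih =>
    intro l cur acc h
    cases l with
    | nil => simp [PySem.Chars.splitOn.go, List.splitOnP_nil]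
    | cons c rest =>
      rw [PySem.Chars.splitOn.go]
      by_cases hc : c = sep
      · subst hc
        have hpre : [c].isPrefixOf (c :: rest) = true := by simp [List.isPrefixOf]
        rw [if_pos hpre]
        simp only [List.length_cons] at h
        simp only [List.length_cons, List.length_nil, List.drop_succ_cons, List.drop_zero]
        rw [ih rest [] (cur.reverse :: acc) (by omega)]
        rw [List.splitOnP_cons]
        simp only [beq_self_eq_true, if_pos]
        obtain ⟨b, t, hbt⟩ := List.exists_cons_of_ne_nil (List.splitOnP_ne_nil (· == c) rest)
        simp [hbt, List.modifyHead_cons]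
      · have hpre : [sep].isPrefixOf (c :: rest) = false := by
          simp [List.isPrefixOf]
          exact fun hh => absurd hh.symm hc
        rw [if_neg (by simp [hpre])]
        simp only [List.length_cons] at h
        rw [ih rest (c :: cur) acc (by omega)]
        rw [List.splitOnP_cons]
        have : (c == sep) = false := by simp [hc]
        rw [this]
        simp only [if_neg Bool.false_ne_true]
        obtain ⟨b, t, hbt⟩ := List.exists_cons_of_ne_nil (List.splitOnP_ne_nil (· == sep) rest)
        simp [hbt, List.modifyHead_cons]

/-- PySem's split on "." is Lean's `List.splitOn '.'`. -/
theorem pv_splitOn_eq (cs : List Char) :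
    PySem.Chars.splitOn cs ['.'] = List.splitOn '.' cs := by
  rw [PySem.Chars.splitOn, pv_go_eq '.' (cs.length+1) cs [] [] (by omega)]
  obtain ⟨b, t, hbt⟩ := List.exists_cons_of_ne_nil (List.splitOnP_ne_nil (· == '.') cs)
  simp [List.splitOn, hbt, List.modifyHead_cons]

theorem pv_splitOn_ne_nil (cs : List Char) : List.splitOn '.' cs ≠ [] :=
  List.splitOnP_ne_nil _ cs

theorem pv_ic_cons (x : Char) (a b : List Char) (t : List (List Char)) :
    [x].intercalate (a :: b :: t) = a ++ x :: [x].intercalate (b :: t) := by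
  simp [List.intercalate, List.intersperse]

/-- split an intercalate at a list boundary -/
theorem pv_intercalate_append (x : Char) :
    ∀ (l1 l2 : List (List Char)), l1 ≠ [] → l2 ≠ [] →
      [x].intercalate (l1 ++ l2) = [x].intercalate l1 ++ x :: [x].intercalate l2 := by
  intro l1
  induction l1 with
  | nil => intro l2 h; exact absurd rfl h
  | cons a l1 ih =>
    intro l2 _ h2
    cases l1 with
    | nil =>
      obtain ⟨b, t, hbt⟩ := List.exists_cons_of_ne_nil h2
      subst hbt
      simp [List.intercalate, List.intersperse]
    | cons a' l1' =>
      have hih := ih l2 (by simp) h2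
      simp only [List.cons_append] at hih ⊢
      rw [pv_ic_cons, hih, pv_ic_cons]
      simp [List.append_assoc]

/-- the heart: `cs ++ "."` is a prefix of `os` iff `cs` is a proper dotted prefix of `os`. -/
theorem pv_main_chars (os cs : List Char) :
    (cs ++ ['.']) <+: os ↔
      ∃ i, 1 ≤ i ∧ i < (List.splitOn '.' os).length ∧
        ['.'].intercalate ((List.splitOn '.' os).take i) = cs := by
  constructor
  · rintro ⟨r, hr⟩
    have hos : os = cs ++ '.' :: r := by simpa using hr.symm
    subst hos
    have hsplit : List.splitOn '.' (cs ++ '.' :: r) = List.splitOn '.' cs ++ List.splitOn '.' r :=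
      List.splitOnP_append_cons _ cs r '.' (by simp)
    refine ⟨(List.splitOn '.' cs).length, ?_, ?_, ?_⟩
    · have := pv_splitOn_ne_nil cs
      cases h : List.splitOn '.' cs with
      | nil => exact absurd h this
      | cons b t => simp [h]
    · rw [hsplit, List.length_append]
      have := pv_splitOn_ne_nil r
      cases h : List.splitOn '.' r with
      | nil => exact absurd h this
      | cons b t => simp [h]
    · rw [hsplit, List.take_left, List.intercalate_splitOn]
  · rintro ⟨i, h1, h2, h3⟩
    have hos : os = ['.'].intercalate (List.splitOn '.' os) := (List.intercalate_splitOn os '.').symm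
    have hsplitit : ['.'].intercalate (List.splitOn '.' os)
        = ['.'].intercalate ((List.splitOn '.' os).take i) ++ '.' ::
          ['.'].intercalate ((List.splitOn '.' os).drop i) := by
      rw [← pv_intercalate_append '.' _ _ ?h1 ?h2, List.take_append_drop]
      · rw [Ne, List.take_eq_nil_iff]
        rintro (h | h)
        · omega
        · exact pv_splitOn_ne_nil os h
      · rw [Ne, List.drop_eq_nil_iff]
        omega
    refine ⟨['.'].intercalate ((List.splitOn '.' os).drop i), ?_⟩
    conv_rhs => rw [hos, hsplitit, h3]
    simp

-- proof-level mirror of B's inner loop: the accumulator strings it visits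
def pvWalk : String → List String → List String
  | _, [] => []
  | a, p :: l => a :: pvWalk (a ++ "." ++ p) l

def pvJoinD : String → List String → String
  | a, [] => a
  | a, p :: l => pvJoinD (a ++ "." ++ p) l

def pvMark (d : PySem.Dict String Bool) (k : String) : PySem.Dict String Bool :=
  if d.contains k then d.insert k true else d

def pvApplyMarks (d : PySem.Dict String Bool) (ms : List String) : PySem.Dict String Bool :=
  ms.foldl pvMark d

-- B's per-code prefix list
def pvAccs (c : String) : List String :=
  let parts : List String := (PySem.Str.split? c ".").getD []
  pvWalk ((PySem.List.pyGet? parts 0).getD "") (parts.drop 1)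

theorem pv_mem_pvWalk (l : List String) : ∀ (a k : String),
    k ∈ pvWalk a l ↔ ∃ i, i < l.length ∧ k = pvJoinD a (l.take i) := by
  induction l with
  | nil => intro a k; simp [pvWalk]
  | cons p l ih =>
    intro a k
    simp only [pvWalk, List.mem_cons, ih]
    constructor
    · rintro (rfl | ⟨i, hi, rfl⟩)
      · exact ⟨0, by simp [pvJoinD]⟩
      · exact ⟨i + 1, by simpa [pvJoinD] using hi, by simp [pvJoinD]⟩
    · rintro ⟨i, hi, rfl⟩
      cases i with
      | zero => left; simp [pvJoinD]
      | succ j => right; exact ⟨j, by simpa using hi, by simp [pvJoinD]⟩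

theorem pv_toList_pvJoinD (l : List String) : ∀ (a : String),
    (pvJoinD a l).toList = ['.'].intercalate (a.toList :: l.map String.toList) := by
  induction l with
  | nil => intro a; simp [pvJoinD, List.intercalate]
  | cons p l ih =>
    intro a
    simp only [pvJoinD, ih, List.map_cons, String.toList_append]
    have : ("." : String).toList = ['.'] := rfl
    rw [this]
    cases l with
    | nil => simp [List.intercalate]
    | cons q t =>
      simp only [List.map_cons]
      rw [pv_ic_cons, pv_ic_cons, pv_ic_cons]
      simp

theorem pv_mark_items (d : PySem.Dict String Bool) (k : String) :
    (pvMark d k).items = d.items.map (fun p => (p.1, p.2 || (p.1 == k))) := by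
  unfold pvMark
  by_cases h : d.contains k = true
  · rw [if_pos h, PySem.Dict.insert, if_pos h]
    refine List.map_congr_left ?_
    intro p _
    by_cases hpk : (p.1 == k) = true
    · have : p.1 = k := by simpa using hpk
      simp [hpk, this]
    · simp [hpk]
  · rw [if_neg h]
    have hall : ∀ p ∈ d.items, (p.1 == k) = false := by
      intro p hp
      by_contra hc
      exact h (List.any_eq_true.mpr ⟨p, hp, by simpa using hc⟩)
    symm
    calc d.items.map (fun p => (p.1, p.2 || (p.1 == k)))
        = d.items.map (fun p => p) := List.map_congr_left (by
          intro p hp; rw [hall p hp]; simp)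
      _ = d.items := by simp

theorem pv_contains_of_items_map (d d' : PySem.Dict String Bool) (f : String × Bool → Bool)
    (h : d'.items = d.items.map (fun p => (p.1, f p))) (c : String) :
    d'.contains c = d.contains c := by
  unfold PySem.Dict.contains
  rw [h, List.any_map]
  rfl

theorem pv_applyMarks_items (ms : List String) : ∀ (d : PySem.Dict String Bool),
    (pvApplyMarks d ms).items = d.items.map (fun p => (p.1, p.2 || decide (p.1 ∈ ms))) := by
  induction ms with
  | nil => intro d; simp [pvApplyMarks]
  | cons k ms ih =>
    intro d
    have : pvApplyMarks d (k :: ms) = pvApplyMarks (pvMark d k) ms := rfl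
    rw [this, ih, pv_mark_items, List.map_map]
    refine List.map_congr_left ?_
    intro p _
    simp only [Function.comp]
    by_cases hpk : p.1 = k
    · subst hpk
      by_cases hm : p.1 ∈ ms <;> simp [hm]
    · have hb : (p.1 == k) = false := beq_eq_false_iff_ne.mpr hpk
      by_cases hm : p.1 ∈ ms <;> simp [hb, hpk, hm]

theorem pv_A_fold_items (f : String → Bool) (cs : List String) :
    ∀ (d : PySem.Dict String Bool), (∀ c ∈ cs, d.contains c = true) →
      (cs.foldl (fun d c => if f c then d.insert c true else d) d).items
        = d.items.map (fun p => (p.1, p.2 || (f p.1 && decide (p.1 ∈ cs)))) := by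
  induction cs with
  | nil => intro d _; simp
  | cons c cs ih =>
    intro d hc
    simp only [List.foldl_cons]
    have hstep : (if f c then d.insert c true else d).items
        = d.items.map (fun p => (p.1, p.2 || (f c && (p.1 == c)))) := by
      by_cases hf : f c
      · have : (if f c then d.insert c true else d) = pvMark d c := by
          rw [if_pos hf, pvMark, if_pos (hc c (by simp))]
        rw [this, pv_mark_items]
        simp [hf]
      · rw [if_neg hf]
        have hf' : f c = false := by simpa using hf
        symm
        calc d.items.map (fun p => (p.1, p.2 || (f c && (p.1 == c))))
            = d.items.map (fun p => p) := List.map_congr_left (by intro p _; simp [hf'])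
          _ = d.items := by simp
    have hcont : ∀ c' ∈ cs, (if f c then d.insert c true else d).contains c' = true := by
      intro c' hc'
      rw [pv_contains_of_items_map d _ _ hstep c']
      exact hc c' (by simp [hc'])
    rw [ih _ hcont, hstep, List.map_map]
    refine List.map_congr_left ?_
    intro p _
    simp only [Function.comp]
    by_cases hpk : p.1 = c
    · subst hpk
      cases hf : f p.1 <;> by_cases hm : p.1 ∈ cs <;> simp [hf, hm]
    · have hb : (p.1 == c) = false := beq_eq_false_iff_ne.mpr hpk
      by_cases hm : p.1 ∈ cs <;> simp [hb, hpk, hm]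

theorem pv_B_inner (l : List String) : ∀ (d : PySem.Dict String Bool) (a : String),
    (l.foldl
      (fun (st : PySem.Dict String Bool × String) p =>
        ((if st.1.contains st.2 then st.1.insert st.2 true else st.1), st.2 ++ "." ++ p))
      (d, a)).1 = pvApplyMarks d (pvWalk a l) := by
  induction l with
  | nil => intro d a; simp [pvWalk, pvApplyMarks]
  | cons p l ih =>
    intro d a
    simp only [List.foldl_cons, pvWalk]
    rw [ih]
    rfl

theorem pv_parts_eq (o : String) :
    (PySem.Str.split? o ".").getD [] = (List.splitOn '.' o.toList).map String.ofList := by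
  rw [PySem.Str.split?]
  have : PySem.Chars.split? o.toList (".").toList = some (List.splitOn '.' o.toList) := by
    rw [show ("." : String).toList = ['.'] from rfl, PySem.Chars.split?]
    simp [pv_splitOn_eq]
  rw [this]
  simp

theorem pv_joinD_take (q0 : List Char) (qrest : List (List Char)) (i : Nat) :
    (pvJoinD (String.ofList q0) ((qrest.map String.ofList).take i)).toList
      = ['.'].intercalate ((q0 :: qrest).take (i + 1)) := by
  rw [pv_toList_pvJoinD]
  simp [← List.map_take, List.map_map, Function.comp_def]

theorem pv_mem_accs (o k : String) :
    k ∈ pvAccs o ↔ (k.toList ++ ['.']) <+: o.toList := by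
  rw [pv_main_chars]
  unfold pvAccs
  rw [pv_parts_eq]
  obtain ⟨q0, qrest, hq⟩ := List.exists_cons_of_ne_nil (pv_splitOn_ne_nil o.toList)
  rw [hq]
  simp only [List.map_cons, List.drop_succ_cons, List.drop_zero]
  have hget : (PySem.List.pyGet? (String.ofList q0 :: qrest.map String.ofList) 0).getD ""
      = String.ofList q0 := by
    rw [show (0 : Int) = ((0 : Nat) : Int) from rfl, PySem.List.pyGet?_natCast]
    simp
  rw [hget, pv_mem_pvWalk]
  constructor
  · rintro ⟨i, hi, rfl⟩
    refine ⟨i + 1, by omega, by simp at hi ⊢; omega, (pv_joinD_take q0 qrest i).symm⟩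
  · rintro ⟨i, h1, h2, h3⟩
    refine ⟨i - 1, by simp at h2 ⊢; omega, ?_⟩
    apply String.ext
    rw [pv_joinD_take q0 qrest (i - 1)]
    have : i - 1 + 1 = i := by omega
    rw [this, h3]

theorem pv_flag_iff (codes : List String) (k : String) :
    ((PySem.Set.ofList codes).any
        (fun other => (other != k) && PySem.Str.startswith other (k ++ ".")) = true)
      ↔ ∃ o ∈ codes, (k.toList ++ ['.']) <+: o.toList := by
  rw [List.any_eq_true]
  constructor
  · rintro ⟨o, ho, hcond⟩
    simp only [Bool.and_eq_true, bne_iff_ne] at hcond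
    refine ⟨o, (PySem.Set.mem_ofList codes o).mp ho, ?_⟩
    have := hcond.2
    rw [PySem.Str.startswith_eq, String.toList_append,
      show ("." : String).toList = ['.'] from rfl] at this
    exact (PySem.Chars.startswith_iff _ _).mp this
  · rintro ⟨o, ho, hpre⟩
    refine ⟨o, (PySem.Set.mem_ofList codes o).mpr ho, ?_⟩
    simp only [Bool.and_eq_true, bne_iff_ne]
    constructor
    · rintro rfl
      obtain ⟨r, hr⟩ := hpre
      have := congrArg List.length hr
      simp at this
    · rw [PySem.Str.startswith_eq, String.toList_append,
        show ("." : String).toList = ['.'] from rfl]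
      exact (PySem.Chars.startswith_iff _ _).mpr hpre

theorem pv_d0_contains (codes : List String) (c : String) :
    ((codes.foldl (fun d c => d.insert c false) (PySem.Dict.empty : PySem.Dict String Bool)).contains c)
      = decide (c ∈ codes) := by
  have hkeys : (codes.foldl (fun d c => d.insert c false)
      (PySem.Dict.empty : PySem.Dict String Bool)).keys = PySem.Set.ofList codes := by
    have := PySem.Dict.keys_foldl_insert codes (fun _ _ => (false : Bool))
      (PySem.Dict.empty : PySem.Dict String Bool)
    simpa [PySem.Dict.empty] using this
  have hcont : ∀ (d : PySem.Dict String Bool), d.contains c = d.keys.any (· == c) := by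
    intro d
    unfold PySem.Dict.contains PySem.Dict.keys
    rw [List.any_map]
    rfl
  rw [hcont, hkeys]
  by_cases h : c ∈ codes
  · rw [decide_eq_true h]
    exact List.any_eq_true.mpr ⟨c, (PySem.Set.mem_ofList codes c).mpr h, by simp⟩
  · rw [decide_eq_false h, ← Bool.not_eq_true, List.any_eq_true]
    rintro ⟨x, hx, hxc⟩
    have hx' : x ∈ codes := (PySem.Set.mem_ofList codes x).mp hx
    have : x = c := by simpa using hxc
    exact h (this ▸ hx')

theorem pv_fold_applyMarks (g : String → List String) (cs : List String) :
    ∀ (d : PySem.Dict String Bool),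
      cs.foldl (fun d c => pvApplyMarks d (g c)) d = pvApplyMarks d (cs.flatMap g) := by
  induction cs with
  | nil => intro d; simp [pvApplyMarks]
  | cons c cs ih =>
    intro d
    simp only [List.foldl_cons, List.flatMap_cons]
    rw [show (List.foldl (fun d c => pvApplyMarks d (g c)) (pvApplyMarks d (g c)) cs)
        = pvApplyMarks (pvApplyMarks d (g c)) (cs.flatMap g) from ih _]
    simp [pvApplyMarks, List.foldl_append]

theorem pv_foldl_congr {α β : Type} (f g : β → α → β) (l : List α) (b : β)
    (h : ∀ d a, a ∈ l → f d a = g d a) : l.foldl f b = l.foldl g b := by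
  induction l generalizing b with
  | nil => rfl
  | cons x l ih =>
    simp only [List.foldl_cons]
    rw [h b x (by simp)]
    exact ih _ (fun d a ha => h d a (by simp [ha]))

theorem pv_d0_mem (codes : List String) (p : String × Bool)
    (hp : p ∈ (codes.foldl (fun d c => d.insert c false)
      (PySem.Dict.empty : PySem.Dict String Bool)).items) : p.1 ∈ codes := by
  have h := pv_d0_contains codes p.1
  have : (codes.foldl (fun d c => d.insert c false)
      (PySem.Dict.empty : PySem.Dict String Bool)).contains p.1 = true :=
    List.any_eq_true.mpr ⟨p, hp, by simp⟩
  rw [h] at this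
  exact of_decide_eq_true this

-- ===== VERDICT (by name: the statement is the Claim_ definition above) =====
theorem compute_is_summary_spec : Claim_equal_compute_is_summary := by
  intro tasks _
  unfold Spec_compute_is_summary
  simp only [compute_is_summary, compute_is_summary_alt]
  set codes : List String :=
    (tasks.map (fun t => PySem.Str.strip (PySem.Dict.getD (PySem.Dict.mk t) "codigo" ""))).filter
      (fun s => s != "") with hcodes
  set d0 : PySem.Dict String Bool :=
    codes.foldl (fun d c => d.insert c false) PySem.Dict.empty with hd0
  -- rewrite B's inner loop as pvApplyMarks over pvAccs
  have hB : (codes.foldl (fun d c =>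
      (((PySem.Str.split? c ".").getD []).drop 1).foldl
        (fun (st : PySem.Dict String Bool × String) p =>
          ((if st.1.contains st.2 then st.1.insert st.2 true else st.1), st.2 ++ "." ++ p))
        (d, (PySem.List.pyGet? ((PySem.Str.split? c ".").getD []) 0).getD "") |>.1) d0)
      = pvApplyMarks d0 (codes.flatMap pvAccs) := by
    rw [← pv_fold_applyMarks pvAccs codes d0]
    refine pv_foldl_congr _ _ codes d0 ?_
    intro d c _
    rw [pv_B_inner]
    rfl
  have hA := pv_A_fold_items
    (fun c => (PySem.Set.ofList codes).any
      (fun other => (other != c) && PySem.Str.startswith other (c ++ "."))) codes d0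
    (by intro c hc; rw [hd0, pv_d0_contains]; simpa)
  rw [hA, hB, pv_applyMarks_items]
  refine List.map_congr_left ?_
  intro p hp
  beta_reduce
  have hmem : p.1 ∈ codes := pv_d0_mem codes p hp
  by_cases H : ∃ o ∈ codes, (p.1.toList ++ ['.']) <+: o.toList
  · have h1 := (pv_flag_iff codes p.1).mpr H
    have h2 : p.1 ∈ codes.flatMap pvAccs := by
      obtain ⟨o, ho, hpre⟩ := H
      exact List.mem_flatMap.mpr ⟨o, ho, (pv_mem_accs o p.1).mpr hpre⟩
    rw [h1, decide_eq_true hmem, decide_eq_true h2]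
    simp
  · have h1 : ((PySem.Set.ofList codes).any
        (fun other => (other != p.1) && PySem.Str.startswith other (p.1 ++ "."))) = false := by
      rw [← Bool.not_eq_true]
      exact fun h => H ((pv_flag_iff codes p.1).mp h)
    have h2 : p.1 ∉ codes.flatMap pvAccs := by
      intro h
      obtain ⟨o, ho, hacc⟩ := List.mem_flatMap.mp h
      exact H ⟨o, ho, (pv_mem_accs o p.1).mp hacc⟩
    rw [h1, decide_eq_false h2]
    simp
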